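-- pv_equiv track=rewrite | github.com/vidyasagarr7/DataStructures-Algos | GeeksForGeeks/Strings/InplaceOccur.py | inplace_replace
-- ===== SOURCE A (Python) =====
-- def compare(str1,pattern,index):
--     length = len(pattern)
--     if index + length > len(str1) :
--         return False
--     for i in range(index,index+length) :
--         a = str1[i]
--         b = pattern[i-index]
--         if str1[i] != pattern[i-index] :
--             return False
--     return True
--
-- def inplace_replace(input_string,pattern):
--     if not input_string :
--         return
--     else :
--         length = len(pattern)
--         j = 0
--         i = 0
--         while i < len(input_string) :
--             if compare(input_string,pattern,i) :
--                 if j > 0 and input_string[j-1] == 'X' :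
--                     i += length
--                     continue
--                 else :
--                     input_string[j] = 'X'
--                     i = i + length
--             else :
--                 input_string[j] = input_string[i]
--                 i += 1
--             j += 1
--         return input_string[:j]
-- ===== SOURCE B (Python) =====
-- # B: two staged passes instead of A's fused in-place scan -- pass 1 collects the
-- # greedy non-overlapping match start positions, pass 2 assembles the output from
-- # the gap slices with collapsed 'X' markers.  (A mutates input_string in place;
-- # B does not -- return-value equivalence only.)
-- def _match_positions(s, pattern):
--     pos = []
--     n, m = len(s), len(pattern)
--     i = 0
--     while i < n:
--         if i + m <= n and all(s[i + k] == pattern[k] for k in range(m)):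
--             pos.append(i)
--             i += m
--         else:
--             i += 1
--     return pos
--
-- def inplace_replace(input_string, pattern):
--     if not input_string:
--         return None
--     m = len(pattern)
--     out = []
--     prev = 0
--     for q in _match_positions(input_string, pattern):
--         out += input_string[prev:q]
--         if not (out and out[-1] == 'X'):
--             out.append('X')
--         prev = q + m
--     out += input_string[prev:]
--     return out
-- ===== Notes on version B (the rewrite author's own statement) =====
-- stated objective: alternative
-- what changed: B is two staged passes -- first collect the greedy non-overlapping match start positions into a list, then assemble the output from the gap slices between runs of matches with collapsed 'X' markers -- replacing A's single fused scan that overwrites input_string element by element in place with a second write pointer; Pre_ excludes nonempty input with an empty pattern, on which A loops forever.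
import Mathlib
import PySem

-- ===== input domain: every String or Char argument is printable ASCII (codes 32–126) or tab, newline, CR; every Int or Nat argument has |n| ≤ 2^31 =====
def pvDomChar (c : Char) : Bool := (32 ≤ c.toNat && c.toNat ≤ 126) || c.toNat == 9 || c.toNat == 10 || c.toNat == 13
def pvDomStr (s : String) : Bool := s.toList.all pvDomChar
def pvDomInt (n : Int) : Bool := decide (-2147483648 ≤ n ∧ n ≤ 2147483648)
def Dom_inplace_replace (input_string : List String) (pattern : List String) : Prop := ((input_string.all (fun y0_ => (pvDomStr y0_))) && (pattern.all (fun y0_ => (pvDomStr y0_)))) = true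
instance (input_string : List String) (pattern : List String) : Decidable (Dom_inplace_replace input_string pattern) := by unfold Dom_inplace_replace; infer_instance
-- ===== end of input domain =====

-- B restructures A's fused in-place scan into two staged passes (collect match
-- positions, then assemble from gap slices); return-value equivalence only (A
-- mutates input_string in place, B does not).

-- ===== PORT A =====
-- compare(str1, pattern, index): guard, then element-by-element scan over
-- range(index, index+length) (ported as List.range' index length; every access is
-- in range under the guard, so getD is exact).
def compareA (str1 : List String) (pattern : List String) (index : Nat) : Bool :=
  if index + pattern.length > str1.length then false
  else (List.range' index pattern.length).all
    (fun i => str1.getD i "" == pattern.getD (i - index) "")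

-- the while loop of A; `s` is the mutated input_string, fuel ≥ number of iterations
-- (a totality guard only: outside Pre_, pattern = [] makes the Python loop diverge).
def loopA (s : List String) (pattern : List String) (i j : Nat) : Nat → List String
  | 0 => s.take j
  | fuel + 1 =>
    if i < s.length then
      if compareA s pattern i then
        if j > 0 && (s.getD (j - 1) "" == "X") then
          loopA s pattern (i + pattern.length) j fuel
        else
          loopA (s.set j "X") pattern (i + pattern.length) (j + 1) fuel
      else
        loopA (s.set j (s.getD i "")) pattern (i + 1) (j + 1) fuel
    else s.take j

def inplace_replace (input_string : List String) (pattern : List String) : Option (List String) :=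
  if input_string.isEmpty then none
  else some (loopA input_string pattern 0 0 (input_string.length + 1))

-- ===== PORT B =====
-- pass 1 (_match_positions): greedy non-overlapping match starts; the Python test
-- `i + m <= n and all(s[i+k] == pattern[k] for k in range(m))` is the bounds check
-- plus an all over List.range m (every access in range under the check, so getD is
-- exact); fuel is a totality guard only (outside Pre_, m = 0 never advances i).
def posLoopB (s : List String) (p : List String) (i : Nat) : Nat → List Nat
  | 0 => []
  | fuel + 1 =>
    if i < s.length then
      if decide (i + p.length ≤ s.length)
          && (List.range p.length).all (fun k => s.getD (i + k) "" == p.getD k "") then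
        i :: posLoopB s p (i + p.length) fuel
      else
        posLoopB s p (i + 1) fuel
    else []

-- pass 2: the for-loop over the position list (structural recursion), carrying
-- (out, prev); input_string[prev:q] is (s.drop prev).take (q - prev), the
-- `out[-1] == 'X'` test is getLast?.
def assembleB (s : List String) (m : Nat) : List Nat → List String → Nat → List String
  | [], out, prev => out ++ s.drop prev
  | q :: rest, out, prev =>
    let out1 := out ++ (s.drop prev).take (q - prev)
    assembleB s m rest (if out1.getLast? == some "X" then out1 else out1 ++ ["X"]) (q + m)

def inplace_replace_alt (input_string : List String) (pattern : List String) : Option (List String) :=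
  if input_string.isEmpty then none
  else some (assembleB input_string pattern.length
    (posLoopB input_string pattern 0 (input_string.length + 1)) [] 0)

-- ===== PRECONDITION & SPEC =====
-- Pre_ excludes only nonempty input with an empty pattern: there Python A's while
-- loop never advances i (i += 0 forever), so A diverges and returns nothing.
def Pre_inplace_replace (input_string : List String) (pattern : List String) : Prop :=
  input_string = [] ∨ pattern ≠ []
instance (input_string : List String) (pattern : List String) : Decidable (Pre_inplace_replace input_string pattern) := by unfold Pre_inplace_replace; infer_instance

def pvWitness_inplace_replace : List String × List String := (["a", "b", "a", "b", "c"], ["a", "b"])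

def Spec_inplace_replace (input_string : List String) (pattern : List String) (out : Option (List String)) : Prop := out = inplace_replace_alt input_string pattern
instance (input_string : List String) (pattern : List String) (out : Option (List String)) : Decidable (Spec_inplace_replace input_string pattern out) := by unfold Spec_inplace_replace; infer_instance

-- ===== CLAIM (what is proved, stated in full; the proofs are below) =====
def Claim_equal_inplace_replace : Prop := ∀ (input_string : List String) (pattern : List String), Dom_inplace_replace input_string pattern → Pre_inplace_replace input_string pattern → Spec_inplace_replace input_string pattern (inplace_replace input_string pattern)

-- ===== LEMMAS AND PROOFS =====

-- taking one element past an in-range set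
lemma take_set_succ (l : List String) (j : Nat) (a : String) (h : j < l.length) :
    (l.set j a).take (j + 1) = l.take j ++ [a] := by
  rw [List.set_eq_take_append_cons_drop, if_pos h, List.take_append]
  have h1 : (l.take j).length = j := List.length_take_of_le (le_of_lt h)
  have h2 : j + 1 - (l.take j).length = 1 := by omega
  rw [h2, List.take_take]
  have h3 : min (j + 1) j = j := by omega
  rw [h3]
  simp

-- A's element-wise compare at i agrees with B's slice test, for i inside the string.
lemma compareA_eq_slice (s p : List String) (i : Nat) (hi : i < s.length) :
    compareA s p i = ((s.drop i).take p.length == p) := by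
  rw [Bool.eq_iff_iff]
  unfold compareA
  by_cases hg : i + p.length > s.length
  · rw [if_pos hg]
    simp only [beq_iff_eq]
    constructor
    · intro h; simp at h
    · intro hEq
      exfalso
      have hlen := congrArg List.length hEq
      simp only [List.length_take, List.length_drop] at hlen
      omega
  · rw [if_neg hg]
    replace hg : i + p.length ≤ s.length := by omega
    simp only [List.all_eq_true, List.mem_range'_1, beq_iff_eq]
    constructor
    · intro h
      apply List.ext_getElem
      · simp; omega
      · intro k h1 h2
        have hk : k < p.length := h2
        have hmem := h (i + k) ⟨Nat.le_add_right _ _, by omega⟩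
        have e1 : (i + k) - i = k := by omega
        rw [e1] at hmem
        rw [List.getD_eq_getElem s _ (by omega), List.getD_eq_getElem p _ hk] at hmem
        simpa [List.getElem_take, List.getElem_drop] using hmem
    · intro h m hm
      obtain ⟨hm1, hm2⟩ := hm
      have hk : m - i < p.length := by omega
      rw [List.getD_eq_getElem s _ (by omega), List.getD_eq_getElem p _ hk]
      have h1 : (List.take p.length (List.drop i s))[m - i]? = p[m - i]? := by rw [h]
      rw [List.getElem?_take, if_pos hk, List.getElem?_drop] at h1
      have e2 : i + (m - i) = m := by omega
      rw [e2, List.getElem?_eq_getElem (by omega), List.getElem?_eq_getElem hk] at h1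
      exact Option.some.inj h1

-- one step of drop-agreement
lemma drop_agree_step (s s0 : List String) (i k : Nat) (h : s.drop i = s0.drop i) :
    s.drop (i + k) = s0.drop (i + k) := by
  have := congrArg (fun l => List.drop k l) h
  simpa [List.drop_drop, Nat.add_comm] using this

-- A's "previous output char is X" test in terms of the output-so-far s.take j
lemma xtest_eq (s : List String) (j : Nat) (hj : j ≤ s.length) :
    (decide (j > 0) && (s.getD (j - 1) "" == "X")) = ((s.take j).getLast? == some "X") := by
  by_cases h0 : j = 0
  · subst h0; simp
  · have hj1 : j - 1 < j := by omega
    have hjs : j - 1 < s.length := by omega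
    have hjlen : (s.take j).length = j := List.length_take_of_le hj
    rw [List.getLast?_eq_getElem?, hjlen, List.getElem?_take]
    rw [if_pos hj1, List.getElem?_eq_getElem hjs]
    rw [List.getD_eq_getElem s _ hjs]
    simp [Nat.pos_of_ne_zero h0]

-- every position pass 1 emits from index i on is ≥ i
lemma posLoopB_ge (s p : List String) :
    ∀ fuel i q, q ∈ posLoopB s p i fuel → i ≤ q := by
  intro fuel
  induction fuel with
  | zero => intro i q h; simp [posLoopB] at h
  | succ fuel ih =>
    intro i q h
    unfold posLoopB at h
    split_ifs at h with h1 h2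
    · rcases List.mem_cons.mp h with rfl | h
      · exact le_refl _
      · exact le_trans (Nat.le_add_right _ _) (ih _ _ h)
    · exact le_trans (Nat.le_succ _) (ih _ _ h)
    · simp at h

-- moving one untouched character from the pending slice into out, for positions ≥ i+1
lemma assembleB_shift (s0 : List String) (m i : Nat) (hi : i < s0.length) :
    ∀ (ps : List Nat) (out : List String), (∀ q ∈ ps, i + 1 ≤ q) →
      assembleB s0 m ps (out ++ [s0.getD i ""]) (i + 1) = assembleB s0 m ps out i := by
  intro ps out hps
  have hcons : s0.drop i = s0.getD i "" :: s0.drop (i + 1) := by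
    rw [List.getD_eq_getElem s0 _ hi]
    exact List.drop_eq_getElem_cons hi
  cases ps with
  | nil =>
    simp only [assembleB, List.append_assoc, List.singleton_append]
    rw [hcons]
  | cons q rest =>
    have hq : i + 1 ≤ q := hps q (List.mem_cons_self ..)
    simp only [assembleB]
    have e : (s0.drop i).take (q - i) = s0.getD i "" :: (s0.drop (i + 1)).take (q - (i + 1)) := by
      rw [hcons]
      have : q - i = (q - (i + 1)) + 1 := by omega
      rw [this, List.take_succ_cons]
    rw [e, List.append_assoc, List.singleton_append]

-- pass 1's bounds-checked element-wise test agrees with the slice of the input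
lemma condB_eq_slice (s0 p : List String) (i : Nat) (hi : i < s0.length) :
    (decide (i + p.length ≤ s0.length)
        && (List.range p.length).all (fun k => s0.getD (i + k) "" == p.getD k ""))
      = ((s0.drop i).take p.length == p) := by
  rw [Bool.eq_iff_iff]
  by_cases hg : i + p.length ≤ s0.length
  · simp only [hg, decide_true, Bool.true_and, List.all_eq_true, List.mem_range, beq_iff_eq]
    constructor
    · intro h
      apply List.ext_getElem
      · simp; omega
      · intro k h1 h2
        have hk : k < p.length := h2
        have hmem := h k hk
        rw [List.getD_eq_getElem s0 _ (by omega), List.getD_eq_getElem p _ hk] at hmem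
        simpa [List.getElem_take, List.getElem_drop] using hmem
    · intro h k hk
      rw [List.getD_eq_getElem s0 _ (by omega), List.getD_eq_getElem p _ hk]
      have h1 : (List.take p.length (List.drop i s0))[k]? = p[k]? := by rw [h]
      rw [List.getElem?_take, if_pos hk, List.getElem?_drop] at h1
      rw [List.getElem?_eq_getElem (by omega), List.getElem?_eq_getElem hk] at h1
      exact Option.some.inj h1
  · have hne : ¬ ((s0.drop i).take p.length = p) := by
      intro hEq
      have hlen := congrArg List.length hEq
      simp only [List.length_take, List.length_drop] at hlen
      omega
    simp [hg, hne]

-- loop synchronisation: with s agreeing with the original s0 from index i on and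
-- out = s.take j, A's fused loop equals pass 2 applied to pass 1's positions.
lemma loopA_eq_passes (s0 p : List String) (hp : p ≠ []) :
    ∀ fuel s i j, s0.length ≤ i + fuel → s.length = s0.length → s.drop i = s0.drop i → j ≤ i →
      loopA s p i j fuel = assembleB s0 p.length (posLoopB s0 p i fuel) (s.take j) i := by
  intro fuel
  induction fuel with
  | zero =>
    intro s i j hfuel hlen hdrop hji
    have hnil : s0.drop i = [] := List.drop_eq_nil_of_le (by omega)
    simp [loopA, posLoopB, assembleB, hnil]
  | succ fuel ih =>
    intro s i j hfuel hlen hdrop hji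
    have hm : 0 < p.length := List.length_pos_of_ne_nil hp
    by_cases hi : i < s.length
    · have hi0 : i < s0.length := by omega
      have hjs : j < s.length := by omega
      rw [loopA, posLoopB, if_pos hi, if_pos hi0]
      have hcmp : compareA s p i = ((s0.drop i).take p.length == p) := by
        rw [compareA_eq_slice s p i hi, hdrop]
      rw [hcmp, xtest_eq s j (le_of_lt hjs), condB_eq_slice s0 p i hi0]
      by_cases hc : ((s0.drop i).take p.length == p) = true
      · rw [if_pos hc, if_pos hc]
        have e1 : assembleB s0 p.length (i :: posLoopB s0 p (i + p.length) fuel) (s.take j) i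
            = assembleB s0 p.length (posLoopB s0 p (i + p.length) fuel)
                (if (s.take j).getLast? == some "X" then s.take j else s.take j ++ ["X"])
                (i + p.length) := by
          simp [assembleB]
        rw [e1]
        by_cases hX : ((s.take j).getLast? == some "X") = true
        · rw [if_pos hX, if_pos hX]
          exact ih s (i + p.length) j (by omega) hlen
            (drop_agree_step s s0 i p.length hdrop) (by omega)
        · rw [if_neg hX, if_neg hX]
          have hrec := ih (s.set j "X") (i + p.length) (j + 1) (by omega)
            (by simp [hlen])
            (by rw [List.drop_set_of_lt (by omega)]
                exact drop_agree_step s s0 i p.length hdrop)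
            (by omega)
          rw [hrec, take_set_succ s j "X" hjs]
      · rw [if_neg hc, if_neg hc]
        have hget : s.getD i "" = s0.getD i "" := by
          have h1 : s[i]? = s0[i]? := by
            have := congrArg (fun l => l[0]?) hdrop
            simpa [List.getElem?_drop] using this
          simp [List.getD, h1]
        have hrec := ih (s.set j (s.getD i "")) (i + 1) (j + 1) (by omega)
          (by simp [hlen])
          (by rw [List.drop_set_of_lt (by omega)]
              exact drop_agree_step s s0 i 1 hdrop)
          (by omega)
        rw [hrec, take_set_succ s j _ hjs, hget]
        exact assembleB_shift s0 p.length i hi0 (posLoopB s0 p (i + 1) fuel) (s.take j)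
          (fun q hq => posLoopB_ge s0 p fuel (i + 1) q hq)
    · have hi0 : ¬ i < s0.length := by omega
      have hnil : s0.drop i = [] := List.drop_eq_nil_of_le (by omega)
      rw [loopA, posLoopB, if_neg hi, if_neg hi0]
      simp [assembleB, hnil]

-- ===== VERDICT (by name: the statement is the Claim_ definition above) =====
theorem inplace_replace_spec : Claim_equal_inplace_replace := by
  intro s p _ hpre
  unfold Spec_inplace_replace inplace_replace inplace_replace_alt
  cases s with
  | nil => simp
  | cons a t =>
    have hp : p ≠ [] := by
      rcases hpre with h | h
      · exact absurd h (by simp)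
      · exact h
    simp only [List.isEmpty_cons, Bool.false_eq_true, if_false]
    have := loopA_eq_passes (a :: t) p hp ((a :: t).length + 1) (a :: t) 0 0 (by omega) rfl rfl (le_refl 0)
    rw [this, List.take_zero]
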